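-- pv_equiv track=rewrite | github.com/AmyTreloar/ProgrammingAtHawker | 2019/Python/ciphers/freq_analysis.py | get_frequency_order
-- ===== SOURCE A (Python) =====
-- ETAOIN = 'ETAOINSHRDLCUMWFGYPBVKJXQZ .,!'
--
-- LETTERS = 'ABCDEFGHIJKLMNOPQRSTUVWXYZ.,! '
--
-- def get_letter_count(mesesage):
--     letter_count = {
--         'A': 0, 'B': 0, 'C': 0, 'D': 0, 'E': 0, 'F': 0,
--         'G': 0, 'H': 0, 'I': 0, 'J': 0, 'K': 0, 'L': 0, 'M': 0, 'N': 0,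
--         'O': 0, 'P': 0, 'Q': 0, 'R': 0, 'S': 0, 'T': 0, 'U': 0, 'V': 0,
--         'W': 0, 'X': 0, 'Y': 0, 'Z': 0, '.': 0, ',':0, '!':0, ' ':0,
--     }
--     for letter in mesesage.upper():
--         if letter not in letter_count:
--             letter_count[letter] = 0
--         if letter in LETTERS:
--             letter_count[letter] += 1
--     return letter_count
--
-- def get_item_at_index_zero(items):
--     return items[0]
--
-- def get_frequency_order(message):
--     letter_to_frequency = get_letter_count(message)
--     frequency_to_letter = {}
--     for letter in LETTERS:
--         if letter_to_frequency[letter] not in frequency_to_letter: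
--             frequency_to_letter[letter_to_frequency[letter]] = [letter]
--         else:
--             frequency_to_letter[letter_to_frequency[letter]].append(letter)
--
--     for freq in frequency_to_letter:
--         frequency_to_letter[freq].sort(key=ETAOIN.find, reverse=True)
--         frequency_to_letter[freq] = ''.join(frequency_to_letter[freq])
--     freq_pairs = list(frequency_to_letter.items())
--     freq_pairs.sort(key=get_item_at_index_zero, reverse=True)
--
--     freq_order = []
--     for freq_pair in freq_pairs:
--         freq_order.append(freq_pair[1])
--
--     return ''.join(freq_order)
-- ===== SOURCE B (Python) =====
-- ETAOIN = 'ETAOINSHRDLCUMWFGYPBVKJXQZ .,!'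
--
-- LETTERS = 'ABCDEFGHIJKLMNOPQRSTUVWXYZ.,! '
--
-- def get_frequency_order(message):
--     counts = {c: 0 for c in LETTERS}
--     for ch in message.upper():
--         if ch in counts:
--             counts[ch] += 1
--     return ''.join(sorted(LETTERS, key=lambda c: (counts[c], ETAOIN.find(c)), reverse=True))
-- ===== Notes on version B (the rewrite author's own statement) =====
-- stated objective: simpler
-- what changed: Replaced the frequency-to-letters bucket dictionary, per-bucket sorting/joining and the sort of the bucket pairs by one direct keyed sort: the 30 symbols of LETTERS are sorted once by the tuple key (count, ETAOIN position) with reverse=True and joined.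
import Mathlib
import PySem

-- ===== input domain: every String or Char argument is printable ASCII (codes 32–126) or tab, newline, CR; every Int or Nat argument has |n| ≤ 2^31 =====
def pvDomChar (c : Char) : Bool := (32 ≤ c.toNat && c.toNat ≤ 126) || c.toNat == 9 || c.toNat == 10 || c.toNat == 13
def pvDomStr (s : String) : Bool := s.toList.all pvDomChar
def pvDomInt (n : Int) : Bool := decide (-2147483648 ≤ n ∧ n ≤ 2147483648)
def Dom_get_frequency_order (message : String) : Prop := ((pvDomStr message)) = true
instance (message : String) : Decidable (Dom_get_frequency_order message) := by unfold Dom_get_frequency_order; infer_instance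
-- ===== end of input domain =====

-- B replaces A's frequency→letters bucket dictionary and two-phase grouping/concatenation by one
-- direct keyed sort of LETTERS (key = (count, ETAOIN position), reverse=True); objective: simpler.

-- ===== PORT A =====
def pvETAOIN : String := "ETAOINSHRDLCUMWFGYPBVKJXQZ .,!"

def pvLETTERS : String := "ABCDEFGHIJKLMNOPQRSTUVWXYZ.,! "

def get_letter_count (mesesage : String) : PySem.Dict Char Int :=
  let letter_count : PySem.Dict Char Int := PySem.Dict.ofList
    [('A',0),('B',0),('C',0),('D',0),('E',0),('F',0),('G',0),('H',0),('I',0),('J',0),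
     ('K',0),('L',0),('M',0),('N',0),('O',0),('P',0),('Q',0),('R',0),('S',0),('T',0),
     ('U',0),('V',0),('W',0),('X',0),('Y',0),('Z',0),('.',0),(',',0),('!',0),(' ',0)]
  (PySem.Str.upper mesesage).toList.foldl
    (fun d letter =>
      let d := if d.contains letter then d else d.insert letter 0
      if PySem.Chars.isIn [letter] pvLETTERS.toList then d.modify letter 0 (· + 1) else d)
    letter_count

def get_item_at_index_zero (items : Int × String) : Int := items.1

def get_frequency_order (message : String) : String :=
  let letter_to_frequency := get_letter_count message
  -- 'if freq not in d: d[freq] = [letter] else: d[freq].append(letter)' is exactly Dict.modify with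
  -- default []; letter_to_frequency[letter] never raises (every LETTERS key is preset), ported as getD.
  let frequency_to_letter : PySem.Dict Int (List Char) :=
    pvLETTERS.toList.foldl
      (fun d letter => d.modify (letter_to_frequency.getD letter 0) [] (· ++ [letter]))
      PySem.Dict.empty
  -- 'for freq in d: d[freq].sort(...); d[freq] = join(...)' rewrites each value in place, in order:
  -- on an association list that is a map over the items.
  let freq_items : List (Int × String) :=
    frequency_to_letter.items.map
      (fun p => (p.1, String.ofList (PySem.List.sorted p.2 (fun c => PySem.Chars.find pvETAOIN.toList [c]) true)))
  let freq_pairs := PySem.List.sorted freq_items get_item_at_index_zero true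
  let freq_order := freq_pairs.foldl (fun acc p => acc ++ [p.2]) ([] : List String)
  PySem.Str.join "" freq_order

-- ===== PORT B =====
def get_frequency_order_alt (message : String) : String :=
  let counts : PySem.Dict Char Int :=
    pvLETTERS.toList.foldl (fun d c => d.insert c 0) PySem.Dict.empty
  let counts :=
    (PySem.Str.upper message).toList.foldl
      (fun d ch => if d.contains ch then d.modify ch 0 (· + 1) else d) counts
  String.ofList
    (PySem.List.sorted2 pvLETTERS.toList (fun c => counts.getD c 0)
      (fun c => PySem.Chars.find pvETAOIN.toList [c]) true)

-- ===== PRECONDITION & SPEC =====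
def Spec_get_frequency_order (message : String) (out : String) : Prop := out = get_frequency_order_alt message
instance (message : String) (out : String) : Decidable (Spec_get_frequency_order message out) := by unfold Spec_get_frequency_order; infer_instance

-- ===== CLAIM (what is proved, stated in full; the proofs are below) =====
def Claim_equal_get_frequency_order : Prop := ∀ (message : String), Dom_get_frequency_order message → Spec_get_frequency_order message (get_frequency_order message)

-- ===== LEMMAS AND PROOFS =====

-- count of c in upper(message): what both programs' dicts hold at c ∈ LETTERS
def pvCnt (m : String) (c : Char) : Int := ((PySem.Str.upper m).toList.count c : Int)
def pvPos (c : Char) : Int := PySem.Chars.find pvETAOIN.toList [c]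
-- the combined sort key: frequency first, ETAOIN position second (positions lie in [0, 30))
def pvK (m : String) (c : Char) : Int := pvCnt m c * 30 + pvPos c
def pvBucket (m : String) (f : Int) : List Char := pvLETTERS.toList.filter (fun c => pvCnt m c == f)
def pvSB (m : String) (f : Int) : List Char := PySem.List.sorted (pvBucket m f) pvPos true
def pvFreqs (m : String) : List Int := PySem.Set.ofList (pvLETTERS.toList.map (pvCnt m))

theorem pvPos_map : pvLETTERS.toList.map pvPos
    = [2,19,11,9,0,15,16,7,4,22,21,10,13,5,3,18,24,8,6,1,12,20,14,23,17,25,27,28,29,26] := by decide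

theorem pvPos_bounds : ∀ c ∈ pvLETTERS.toList, 0 ≤ pvPos c ∧ pvPos c < 30 := by
  intro c hc
  have h : pvPos c ∈ pvLETTERS.toList.map pvPos := List.mem_map_of_mem hc
  rw [pvPos_map] at h
  have hall : ∀ x ∈ ([2,19,11,9,0,15,16,7,4,22,21,10,13,5,3,18,24,8,6,1,12,20,14,23,17,25,27,28,29,26] : List Int),
      0 ≤ x ∧ x < 30 := by decide
  exact hall _ h

theorem pvPos_map_nodup : (pvLETTERS.toList.map pvPos).Nodup := by rw [pvPos_map]; decide

theorem pvPos_inj : ∀ a ∈ pvLETTERS.toList, ∀ b ∈ pvLETTERS.toList, pvPos a = pvPos b → a = b :=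
  fun a ha b hb h => List.inj_on_of_nodup_map pvPos_map_nodup ha hb h

theorem pvNodupL : pvLETTERS.toList.Nodup := pvPos_map_nodup.of_map

theorem pvIsIn_of_mem {c : Char} {l : List Char} (h : c ∈ l) : PySem.Chars.isIn [c] l = true := by
  rw [PySem.Chars.isIn_iff_infix]
  obtain ⟨s, t, rfl⟩ := List.append_of_mem h
  exact ⟨s, t, by simp⟩

-- A's initial letter_count dict holds 0 everywhere (all preset values are 0)
theorem pvGetD_update_zero (ps : List (Char × Int)) (c : Char) :
    ∀ d : PySem.Dict Char Int, d.getD c 0 = 0 → (∀ p ∈ ps, p.2 = 0) →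
      (d.update ps).getD c 0 = 0 := by
  induction ps with
  | nil => intro d h0 _; exact h0
  | cons p t ih =>
      intro d h0 hz
      have : (d.insert p.1 p.2).getD c 0 = 0 := by
        rw [PySem.Dict.getD_insert]
        split
        · exact hz p (by simp)
        · exact h0
      exact ih _ this (fun q hq => hz q (by simp [hq]))

-- A's counting loop: the entry of c ∈ LETTERS ends at (initial value) + count of c
theorem pvCountA_fold (c : Char) (hc : c ∈ pvLETTERS.toList) (l : List Char) :
    ∀ d : PySem.Dict Char Int,
      (l.foldl (fun d letter =>
          let d := if d.contains letter then d else d.insert letter 0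
          if PySem.Chars.isIn [letter] pvLETTERS.toList then d.modify letter 0 (· + 1) else d) d).getD c 0
        = d.getD c 0 + (l.count c : Int) := by
  induction l with
  | nil => intro d; simp
  | cons ch t ih =>
      intro d
      rw [List.foldl_cons, ih]
      have hstep : (let d' := if d.contains ch then d else d.insert ch 0
          if PySem.Chars.isIn [ch] pvLETTERS.toList then d'.modify ch 0 (· + 1) else d').getD c 0
          = d.getD c 0 + (if ch = c then 1 else 0) := by
        simp only []
        by_cases hch : ch = c
        · subst hch
          rw [if_pos (pvIsIn_of_mem hc)]
          have h1 : (if d.contains ch then d else d.insert ch 0).getD ch 0 = d.getD ch 0 := by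
            split
            · rfl
            · next hnc =>
              rw [PySem.Dict.getD_insert]
              simp [PySem.Dict.getD_of_not_contains d 0 (by simpa using hnc)]
          rw [PySem.Dict.getD_modify_self, h1]
          simp
        · have h1 : (if d.contains ch then d else d.insert ch 0).getD c 0 = d.getD c 0 := by
            split
            · rfl
            · rw [PySem.Dict.getD_insert, if_neg (fun h => hch h.symm)]
          split
          · rw [PySem.Dict.getD_modify, if_neg (fun h => hch h.symm), h1]; simp [hch]
          · rw [h1]; simp [hch]
      rw [hstep, List.count_cons]
      by_cases hch : ch = c <;> simp [hch] <;> push_cast <;> ring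

theorem pvCountA (m : String) (c : Char) (hc : c ∈ pvLETTERS.toList) :
    (get_letter_count m).getD c 0 = pvCnt m c := by
  unfold get_letter_count pvCnt
  rw [pvCountA_fold c hc]
  have h0 : (PySem.Dict.ofList
      [('A',(0:Int)),('B',0),('C',0),('D',0),('E',0),('F',0),('G',0),('H',0),('I',0),('J',0),
       ('K',0),('L',0),('M',0),('N',0),('O',0),('P',0),('Q',0),('R',0),('S',0),('T',0),
       ('U',0),('V',0),('W',0),('X',0),('Y',0),('Z',0),('.',0),(',',0),('!',0),(' ',0)]).getD c 0 = 0 := by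
    unfold PySem.Dict.ofList
    exact pvGetD_update_zero _ c PySem.Dict.empty (by simp) (by decide)
  rw [h0]; ring

-- B's counting loop keeps the same totals (keys of LETTERS are preset, others are skipped)
theorem pvCountB_fold (c : Char) (l : List Char) :
    ∀ d : PySem.Dict Char Int, d.contains c = true →
      ((l.foldl (fun d ch => if d.contains ch then d.modify ch 0 (· + 1) else d) d).getD c 0
        = d.getD c 0 + (l.count c : Int)) := by
  induction l with
  | nil => intro d _; simp
  | cons ch t ih =>
      intro d hcont
      rw [List.foldl_cons]
      have hcont' : (if d.contains ch then d.modify ch 0 (· + 1) else d).contains c = true := by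
        split
        · rw [PySem.Dict.contains_modify]; simp [hcont]
        · exact hcont
      rw [ih _ hcont']
      have hstep : (if d.contains ch then d.modify ch 0 (· + 1) else d).getD c 0
          = d.getD c 0 + (if ch = c then 1 else 0) := by
        by_cases hch : ch = c
        · subst hch
          rw [if_pos hcont, PySem.Dict.getD_modify_self]; simp
        · split
          · rw [PySem.Dict.getD_modify, if_neg (fun h => hch h.symm)]; simp [hch]
          · simp [hch]
      rw [hstep, List.count_cons]
      by_cases hch : ch = c <;> simp [hch] <;> push_cast <;> ring

theorem pvB0_facts : ∀ c ∈ pvLETTERS.toList,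
    (pvLETTERS.toList.foldl (fun d c => d.insert c 0) (PySem.Dict.empty : PySem.Dict Char Int)).contains c = true ∧
    (pvLETTERS.toList.foldl (fun d c => d.insert c 0) (PySem.Dict.empty : PySem.Dict Char Int)).getD c 0 = 0 := by
  have h : pvLETTERS.toList.all (fun c =>
      (pvLETTERS.toList.foldl (fun d c => d.insert c 0) (PySem.Dict.empty : PySem.Dict Char Int)).contains c &&
      ((pvLETTERS.toList.foldl (fun d c => d.insert c 0) (PySem.Dict.empty : PySem.Dict Char Int)).getD c 0 == 0)) = true := by
    decide
  intro c hc
  have hb := List.all_eq_true.1 h c hc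
  simp only [Bool.and_eq_true, beq_iff_eq] at hb
  exact hb

-- insertion with pointwise-equal comparison functions is the same insertion
theorem pvInsertBy_congr {α : Type} (b1 b2 : α → α → Bool) (x : α) (ys : List α)
    (h : ∀ y ∈ ys, b1 x y = b2 x y) :
    PySem.List.insertBy b1 x ys = PySem.List.insertBy b2 x ys := by
  induction ys with
  | nil => rfl
  | cons y t ih =>
      simp only [PySem.List.insertBy]
      rw [h y (by simp)]
      split
      · rfl
      · have := ih (fun z hz => h z (by simp [hz]))
        simp only [PySem.List.insertBy] at this
        rw [this]

theorem pvFoldl_insertBy_congr {α : Type} (b1 b2 : α → α → Bool) (S : α → Prop)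
    (hb : ∀ x y, S x → S y → b1 x y = b2 x y) :
    ∀ (xs acc : List α), (∀ x ∈ xs, S x) → (∀ y ∈ acc, S y) →
      xs.foldl (fun acc x => PySem.List.insertBy b1 x acc) acc
        = xs.foldl (fun acc x => PySem.List.insertBy b2 x acc) acc := by
  intro xs
  induction xs with
  | nil => intro acc _ _; rfl
  | cons x t ih =>
      intro acc hxs hacc
      have hx : S x := hxs x (by simp)
      rw [List.foldl_cons, List.foldl_cons,
        pvInsertBy_congr b1 b2 x acc (fun y hy => hb x y hx (hacc y hy))]
      exact ih _ (fun z hz => hxs z (by simp [hz]))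
        (fun y hy => by rcases (PySem.List.mem_insertBy _ _ _ _).1 hy with rfl | hy
                        · exact hx
                        · exact hacc y hy)

-- [] .intercalate = flatten
theorem pvIntercalate_nil (ls : List (List Char)) : ([] : List Char).intercalate ls = ls.flatten := by
  induction ls with
  | nil => rfl
  | cons h t ih =>
      cases t with
      | nil => simp [List.intercalate]
      | cons b t2 =>
          simp only [List.intercalate, List.intersperse, List.flatten] at ih ⊢
          simp_all

theorem pvSum_if (F : List Int) (k : Int) (c : Nat) :
    (F.map (fun f => if k == f then c else 0)).sum = F.count k * c := by
  induction F with
  | nil => simp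
  | cons f t ih =>
      simp only [List.map_cons, List.sum_cons, List.count_cons, ih]
      by_cases h : k = f
      · simp [h, Nat.add_mul, Nat.add_comm]
      · have h2 : f ≠ k := fun hfk => h hfk.symm
        simp [h, h2]

-- partitioning a list by the distinct values of a key and flattening is a permutation
theorem pvFlatten_filter_perm (l : List Char) (key : Char → Int) (F : List Int)
    (hnd : F.Nodup) (hcov : ∀ x ∈ l, key x ∈ F) :
    ((F.map (fun f => l.filter (fun x => key x == f))).flatten).Perm l := by
  rw [List.perm_iff_count]
  intro a
  rw [List.count_flatten, List.map_map]
  by_cases ha : a ∈ l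
  · have hmap : (F.map (List.count a ∘ fun f => l.filter (fun x => key x == f)))
        = F.map (fun f => if key a == f then l.count a else 0) := by
      apply List.map_congr_left
      intro f _
      simp only [Function.comp]
      by_cases hf : key a = f
      · rw [if_pos (by simp [hf]), List.count_filter (by simp [hf])]
      · rw [if_neg (by simp [hf])]
        rw [List.count_eq_zero]
        intro hmem
        have := List.of_mem_filter hmem
        simp at this
        exact hf this
    rw [hmap, pvSum_if]
    have h1 : F.count (key a) = 1 := List.count_eq_one_of_mem hnd (hcov a ha)
    simp [h1]
  · have : ∀ x ∈ F.map (List.count a ∘ fun f => l.filter (fun x => key x == f)), x = 0 := by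
      intro x hx
      rcases List.mem_map.1 hx with ⟨f, _, rfl⟩
      simp only [Function.comp]
      rw [List.count_eq_zero]
      intro hmem
      exact ha (List.mem_of_mem_filter hmem)
    rw [List.sum_eq_zero this, List.count_eq_zero.2 ha]

theorem pvFlatten_perm_of_forall (L : List Int) (f g : Int → List Char)
    (h : ∀ k ∈ L, (f k).Perm (g k)) : ((L.map f).flatten).Perm ((L.map g).flatten) := by
  induction L with
  | nil => rfl
  | cons k t ih =>
      simp only [List.map_cons, List.flatten_cons]
      exact (h k (by simp)).append (ih (fun j hj => h j (by simp [hj])))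

-- B's count dict agrees with pvCnt on LETTERS
theorem pvCountB (m : String) (c : Char) (hc : c ∈ pvLETTERS.toList) :
    (((PySem.Str.upper m).toList.foldl
        (fun d ch => if d.contains ch then d.modify ch 0 (· + 1) else d)
        (pvLETTERS.toList.foldl (fun d c => d.insert c 0) (PySem.Dict.empty : PySem.Dict Char Int))).getD c 0)
      = pvCnt m c := by
  rw [pvCountB_fold c _ _ (pvB0_facts c hc).1, (pvB0_facts c hc).2]
  unfold pvCnt; ring

-- the Bool comparison used by B's tuple sort agrees with the combined scalar key pvK
theorem pvBefore_eq (m : String) (k1 : Char → Int) (hk1 : ∀ c ∈ pvLETTERS.toList, k1 c = pvCnt m c) :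
    ∀ x ∈ pvLETTERS.toList, ∀ y ∈ pvLETTERS.toList,
      (decide (k1 y < k1 x) || (!decide (k1 x < k1 y) && decide (pvPos y < pvPos x)))
        = decide (pvK m y < pvK m x) := by
  intro x hx y hy
  rw [hk1 x hx, hk1 y hy, ← decide_not, ← Bool.decide_and, ← Bool.decide_or, decide_eq_decide]
  have hbx := pvPos_bounds x hx
  have hby := pvPos_bounds y hy
  unfold pvK
  omega

theorem pvAlt_eq (m : String) :
    get_frequency_order_alt m
      = String.ofList (PySem.List.sorted pvLETTERS.toList (pvK m) true) := by
  unfold get_frequency_order_alt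
  simp only []
  refine congrArg String.ofList ?_
  rw [PySem.List.sorted_rev_eq_foldl_insertBy]
  simp only [PySem.List.sorted2, if_pos]
  apply pvFoldl_insertBy_congr _ _ (fun c => c ∈ pvLETTERS.toList)
  · intro x y hx hy
    exact pvBefore_eq m _ (fun c hc => pvCountB m c hc) x hx y hy
  · exact fun x hx => hx
  · simp

theorem pvSB_mem {m : String} {k : Int} {a : Char} (h : a ∈ pvSB m k) :
    pvCnt m a = k ∧ a ∈ pvLETTERS.toList := by
  unfold pvSB pvBucket at h
  rw [PySem.List.mem_sorted] at h
  have h2 := List.mem_filter.1 h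
  exact ⟨by simpa using h2.2, h2.1⟩

theorem pvSB_nodup (m : String) (k : Int) : (pvSB m k).Nodup :=
  ((PySem.List.sorted_perm _ _ _).nodup_iff).2 (pvNodupL.filter _)

-- inside one bucket the frequency is constant and ETAOIN positions strictly decrease
theorem pvSB_pairwise (m : String) (k : Int) :
    (pvSB m k).Pairwise (fun a b => pvK m b < pvK m a) := by
  have h1 : (pvSB m k).Pairwise (fun a b => pvPos b ≤ pvPos a) :=
    PySem.List.sorted_pairwise_rev _ _
  have h2 : (pvSB m k).Pairwise (· ≠ ·) := pvSB_nodup m k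
  refine (h1.and h2).imp_of_mem ?_
  intro a b ha hb hab
  have hma := pvSB_mem ha
  have hmb := pvSB_mem hb
  have hne : pvPos b ≠ pvPos a := fun h => hab.2 (pvPos_inj b hmb.2 a hma.2 h).symm
  have : pvPos b < pvPos a := lt_of_le_of_ne hab.1 hne
  unfold pvK
  rw [hma.1, hmb.1]
  omega

-- A's concatenated buckets are a permutation of LETTERS …
theorem pvFlat_perm (m : String) (F : List Int) (hF : F.Perm (pvFreqs m)) :
    ((F.map (pvSB m)).flatten).Perm pvLETTERS.toList := by
  have s1 : ((F.map (pvSB m)).flatten).Perm ((F.map (pvBucket m)).flatten) :=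
    pvFlatten_perm_of_forall F _ _ (fun j _ => PySem.List.sorted_perm _ _ _)
  have s2 : ((F.map (pvBucket m)).flatten).Perm (((pvFreqs m).map (pvBucket m)).flatten) :=
    (hF.map (pvBucket m)).flatten
  have s3 : (((pvFreqs m).map (pvBucket m)).flatten).Perm pvLETTERS.toList := by
    apply pvFlatten_filter_perm
    · exact PySem.Set.nodup_ofList _
    · intro x hx
      unfold pvFreqs
      rw [PySem.Set.mem_ofList]
      exact List.mem_map_of_mem hx
  exact (s1.trans s2).trans s3

-- … and strictly decreasing in the combined key when bucket frequencies strictly decrease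
theorem pvFlat_pairwise (m : String) (F : List Int) (hp : F.Pairwise (fun f g => g < f)) :
    ((F.map (pvSB m)).flatten).Pairwise (fun a b => pvK m b < pvK m a) := by
  rw [List.pairwise_flatten]
  constructor
  · intro l hl
    rcases List.mem_map.1 hl with ⟨k, _, rfl⟩
    exact pvSB_pairwise m k
  · rw [List.pairwise_map]
    refine hp.imp ?_
    intro f g hlt a ha b hb
    have hma := pvSB_mem ha
    have hmb := pvSB_mem hb
    have hba := pvPos_bounds a hma.2
    have hbb := pvPos_bounds b hmb.2
    unfold pvK
    rw [hma.1, hmb.1]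
    omega

set_option maxHeartbeats 2000000 in
theorem get_frequency_order_spec_aux (m : String) :
    get_frequency_order m = get_frequency_order_alt m := by
  rw [pvAlt_eq]
  unfold get_frequency_order
  simp only []
  -- replace the dict lookups in the grouping fold by pvCnt
  rw [PySem.List.foldl_congr_mem _
      (fun d letter => PySem.Dict.modify d ((get_letter_count m).getD letter 0) [] (· ++ [letter]))
      (fun d letter => PySem.Dict.modify d (pvCnt m letter) [] (· ++ [letter]))
      PySem.Dict.empty
      (fun acc x hx => by dsimp only; rw [pvCountA m x hx])]
  -- d1 is the grouping dict
  set d1 := pvLETTERS.toList.foldl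
      (fun d letter => PySem.Dict.modify d (pvCnt m letter) [] (· ++ [letter]))
      PySem.Dict.empty with hd1
  have hnodup : d1.keys.Nodup := by
    rw [hd1]
    exact PySem.Dict.nodup_keys_foldl_modify_key _ (pvCnt m) [] (fun d c v => v ++ [c]) _
      PySem.Dict.nodup_keys_empty
  have hkeys : d1.keys = pvFreqs m := by
    rw [hd1, PySem.Dict.keys_foldl_modify_key _ (pvCnt m) [] (fun d c v => v ++ [c])]
    simp only [PySem.Dict.keys_empty]
    unfold pvFreqs
    rw [PySem.Set.ofList_eq_foldl]
    rfl
  have hgetD : ∀ f : Int, d1.getD f [] = pvBucket m f := by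
    intro f
    rw [hd1, ← List.foldl_map (f := fun c => ((pvCnt m c, c) : Int × Char))
        (g := fun d p => PySem.Dict.modify d p.1 [] (· ++ [p.2]))]
    rw [PySem.Dict.getD_foldl_modify_append]
    simp only [PySem.Dict.getD_empty, List.nil_append, List.filter_map, List.map_map]
    unfold pvBucket
    rw [show ((fun p => p.1 == f) ∘ fun c => ((pvCnt m c, c) : Int × Char)) = (fun c => pvCnt m c == f) from rfl]
    rw [show ((fun x : Int × Char => x.2) ∘ fun c => ((pvCnt m c, c) : Int × Char)) = id from rfl, List.map_id]
  have hitems : d1.items = (pvFreqs m).map (fun k => (k, pvBucket m k)) := by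
    rw [PySem.Dict.items_eq_map_keys d1 hnodup [], hkeys]
    exact List.map_congr_left (fun k _ => by rw [hgetD])
  -- the rewritten items list
  have hfi : d1.items.map
      (fun p => (p.1, String.ofList (PySem.List.sorted p.2 (fun c => PySem.Chars.find pvETAOIN.toList [c]) true)))
      = (pvFreqs m).map (fun k => (k, String.ofList (pvSB m k))) := by
    rw [hitems, List.map_map]
    exact List.map_congr_left (fun k _ => by unfold pvSB pvPos; rfl)
  rw [hfi]
  -- the sorted pair list
  set FP := PySem.List.sorted ((pvFreqs m).map (fun k => (k, String.ofList (pvSB m k))))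
      get_item_at_index_zero true with hFP
  set F := FP.map (fun p => p.1) with hF
  have hperm : FP.Perm ((pvFreqs m).map (fun k => (k, String.ofList (pvSB m k)))) :=
    PySem.List.sorted_perm _ _ _
  have hmapid : ((pvFreqs m).map (fun k => (k, String.ofList (pvSB m k)))).map (fun p => p.1)
      = pvFreqs m := by
    rw [List.map_map]
    exact (List.map_congr_left (fun k _ => rfl)).trans (List.map_id _)
  have hFperm : F.Perm (pvFreqs m) := by
    rw [hF]
    have h3 := hperm.map (fun p => p.1)
    rw [hmapid] at h3
    exact h3
  have hFnodup : F.Nodup := (hFperm.nodup_iff).2 (PySem.Set.nodup_ofList _)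
  have hform : ∀ p ∈ FP, p = (p.1, String.ofList (pvSB m p.1)) := by
    intro p hp
    rcases List.mem_map.1 (hperm.subset hp) with ⟨k, _, rfl⟩
    rfl
  have hFP_eq : FP = F.map (fun k => (k, String.ofList (pvSB m k))) := by
    rw [hF, List.map_map]
    conv_lhs => rw [← List.map_id FP]
    exact List.map_congr_left (fun p hp => hform p hp)
  have hpairfst : FP.Pairwise (fun p q => q.1 < p.1) := by
    have h1 : FP.Pairwise (fun p q => get_item_at_index_zero q ≤ get_item_at_index_zero p) :=
      PySem.List.sorted_pairwise_rev _ _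
    have h2 : FP.Pairwise (fun p q => p.1 ≠ q.1) := List.pairwise_map.1 hFnodup
    exact (h1.and h2).imp (fun h => lt_of_le_of_ne h.1 (fun he => h.2 he.symm))
  have hpairF : F.Pairwise (fun f g => g < f) := List.pairwise_map.2 hpairfst
  -- assemble the output string
  rw [PySem.List.foldl_append_singleton_eq_map (fun p => p.2) FP []]
  rw [List.nil_append]
  conv_lhs => rw [hFP_eq, List.map_map]
  unfold PySem.Str.join
  refine congrArg String.ofList ?_
  have hjoin : PySem.Chars.join "".toList
      (List.map String.toList (List.map ((fun p => p.2) ∘ fun k => (k, String.ofList (pvSB m k))) F))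
      = (F.map (pvSB m)).flatten := by
    show PySem.Chars.join [] _ = _
    unfold PySem.Chars.join
    rw [pvIntercalate_nil, List.map_map]
    refine congrArg List.flatten ?_
    apply List.map_congr_left
    intro k _
    simp
  rw [hjoin]
  exact (PySem.List.sorted_rev_eq_of_perm_of_pairwise_gt _ _ _
      (pvFlat_perm m F hFperm) (pvFlat_pairwise m F hpairF)).symm

-- ===== VERDICT (by name: the statement is the Claim_ definition above) =====
theorem get_frequency_order_spec : Claim_equal_get_frequency_order := by
  intro message _
  unfold Spec_get_frequency_order
  exact get_frequency_order_spec_aux message
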